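-- pv_equiv track=rewrite | github.com/SaaidiaFarouk/Finding-Hidden-Messages-in-DNA-Bioinformatics-I- | week 1 2 3/Clump-finder.py | clumpfinder
-- ===== SOURCE A (Python) =====
-- def patterncount(text,pattern):
--     c=0
--     for i in range(len(text)-len(pattern)+1):
--         if text[i:i+len(pattern)]==pattern:
--             c=c+1
--     return c
--
-- def frequency_table(text,k):
--     countt=list()
--     for i in range(len(text)-k+1):
--         pattern=(text[i:i+k])
--         countt.append(patterncount(text,pattern))
--     return countt
--
-- def clumpfinder(text,k,l,t):
--     clumps=list()
--     for i in range(len(text)-l+1):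
--         sequence=(text[i:i+l])
--         listt=frequency_table(sequence,k)
--         for j in range(len(listt)):
--             if listt[j]>=t and (sequence[j:j+k] not in clumps):
--                 clumps.append(sequence[j:j+k])
--     return clumps
-- ===== SOURCE B (Python) =====
-- def clumpfinder(text, k, l, t):
--     clumps = []
--     seen = set()
--     for i in range(len(text) - l + 1):
--         window = text[i:i+l]
--         kmers = [window[j:j+k] for j in range(len(window) - k + 1)]
--         counts = {}
--         for m in kmers:
--             counts[m] = counts.get(m, 0) + 1
--         for m in kmers:
--             if counts[m] >= t and m not in seen:
--                 seen.add(m)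
--                 clumps.append(m)
--     return clumps
-- ===== Notes on version B (the rewrite author's own statement) =====
-- stated objective: alternative
-- what changed: Per window, A calls patterncount (a full rescan of the window) for every position via frequency_table; B instead builds one k-mer count dictionary per window in a single pass and deduplicates with a set instead of scanning the output list.
-- outside the precondition, e.g. on clumpfinder('AB', -3, 2, 4): A returns [], B returns ['']
import Mathlib
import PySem

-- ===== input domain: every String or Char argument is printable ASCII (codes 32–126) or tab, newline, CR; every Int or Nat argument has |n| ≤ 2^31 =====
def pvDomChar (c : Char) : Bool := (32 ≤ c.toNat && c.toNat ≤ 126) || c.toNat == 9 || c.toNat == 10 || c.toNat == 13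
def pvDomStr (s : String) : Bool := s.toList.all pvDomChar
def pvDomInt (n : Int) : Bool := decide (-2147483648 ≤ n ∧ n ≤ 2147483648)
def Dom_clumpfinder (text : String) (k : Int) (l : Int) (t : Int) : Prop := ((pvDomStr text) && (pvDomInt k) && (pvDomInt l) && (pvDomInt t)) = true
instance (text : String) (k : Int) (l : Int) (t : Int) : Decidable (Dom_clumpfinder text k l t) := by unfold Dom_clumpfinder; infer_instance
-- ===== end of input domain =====

-- B replaces A's per-window frequency_table (repeated patterncount scans) by a k-mer count
-- dictionary built once per window plus a set for deduplication (objective: alternative).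


-- ===== PORT A =====
def patterncountA (text : List Char) (pattern : List Char) : Int :=
  (PySem.List.pyRange 0 ((text.length : Int) - (pattern.length : Int) + 1)).foldl
    (fun c i =>
      if PySem.List.slice text (some i) (some (i + (pattern.length : Int))) = pattern then c + 1
      else c) 0

def frequencyTableA (text : List Char) (k : Int) : List Int :=
  (PySem.List.pyRange 0 ((text.length : Int) - k + 1)).foldl
    (fun countt i =>
      countt ++ [patterncountA text (PySem.List.slice text (some i) (some (i + k)))]) []

def clumpfinder (text : String) (k : Int) (l : Int) (t : Int) : List String :=
  ((PySem.List.pyRange 0 ((text.toList.length : Int) - l + 1)).foldl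
    (fun clumps i =>
      let sequence := PySem.List.slice text.toList (some i) (some (i + l))
      let listt := frequencyTableA sequence k
      (PySem.List.pyRange 0 ((listt.length : Int))).foldl
        (fun clumps j =>
          if t ≤ PySem.List.pyGetD listt j 0 ∧
             PySem.List.slice sequence (some j) (some (j + k)) ∉ clumps then
            clumps ++ [PySem.List.slice sequence (some j) (some (j + k))]
          else clumps) clumps)
    ([] : List (List Char))).map String.mk

-- ===== PORT B =====
def kmersB (window : List Char) (k : Int) : List (List Char) :=
  (PySem.List.pyRange 0 ((window.length : Int) - k + 1)).map
    (fun j => PySem.List.slice window (some j) (some (j + k)))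

def countsB (kmers : List (List Char)) : PySem.Dict (List Char) Int :=
  kmers.foldl (fun d m => d.insert m (d.getD m 0 + 1)) PySem.Dict.empty

def clumpfinder_alt (text : String) (k : Int) (l : Int) (t : Int) : List String :=
  let st :=
    (PySem.List.pyRange 0 ((text.toList.length : Int) - l + 1)).foldl
      (fun st i =>
        let window := PySem.List.slice text.toList (some i) (some (i + l))
        let kmers := kmersB window k
        let counts := countsB kmers
        kmers.foldl
          (fun st m =>
            if t ≤ counts.getD m 0 ∧ m ∉ st.2 then (st.1 ++ [m], PySem.Set.add st.2 m)
            else st) st)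
      (([] : List (List Char)), (PySem.Set.empty : PySem.Set (List Char)))
  st.1.map String.mk

-- ===== PRECONDITION & SPEC =====
-- Pre_ restricts to the natural domain k ≥ 0: a k-mer length is never negative, and for k < 0
-- A's bookkeeping on empty slices is an artefact (it counts occurrences of '' over a longer range).
def Pre_clumpfinder (text : String) (k : Int) (l : Int) (t : Int) : Prop := 0 ≤ k
instance (text : String) (k : Int) (l : Int) (t : Int) : Decidable (Pre_clumpfinder text k l t) := by unfold Pre_clumpfinder; infer_instance

def pvWitness_clumpfinder : String × Int × Int × Int := ("ACGTACGAACGT", 2, 5, 2)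

def Spec_clumpfinder (text : String) (k : Int) (l : Int) (t : Int) (out : List String) : Prop := out = clumpfinder_alt text k l t
instance (text : String) (k : Int) (l : Int) (t : Int) (out : List String) : Decidable (Spec_clumpfinder text k l t out) := by unfold Spec_clumpfinder; infer_instance

-- ===== CLAIM (what is proved, stated in full; the proofs are below) =====
def Claim_equal_clumpfinder : Prop := ∀ (text : String) (k : Int) (l : Int) (t : Int), Dom_clumpfinder text k l t → Pre_clumpfinder text k l t → Spec_clumpfinder text k l t (clumpfinder text k l t)

-- ===== LEMMAS AND PROOFS =====

lemma pyRange_len_idem (N : Int) :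
    PySem.List.pyRange 0 ((PySem.List.pyRange 0 N).length : Int) = PySem.List.pyRange 0 N := by
  by_cases h : N ≤ 0
  · have he : PySem.List.pyRange 0 N = [] := by
      rw [PySem.List.pyRange_of_pos 0 N (by norm_num : (0:Int) < 1), if_neg (by omega)]
      simp
    rw [he]
    simp [PySem.List.pyRange_zero_natCast 0]
  · have hN : N = (N.toNat : Int) := by omega
    have hlen : (PySem.List.pyRange 0 ((N.toNat : Nat) : Int)).length = N.toNat := by
      rw [PySem.List.pyRange_zero_natCast]; simp
    rw [hN, hlen]

lemma slice_len (seq : List Char) (j k : Int) (hj : 0 ≤ j) (hk : 0 ≤ k)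
    (hjk : j + k ≤ (seq.length : Int)) :
    ((PySem.List.slice seq (some j) (some (j + k))).length : Int) = k := by
  rw [PySem.List.length_slice]
  have h1 : PySem.List.clampIdx seq.length (j + k) = (j + k).toNat := by
    unfold PySem.List.clampIdx
    rw [if_neg (by omega), min_eq_left (by omega)]
  have h2 : PySem.List.clampIdx seq.length j = j.toNat := by
    unfold PySem.List.clampIdx
    rw [if_neg (by omega), min_eq_left (by omega)]
  rw [h1, h2]
  omega

lemma patterncount_eq_count (seq : List Char) (k j : Int) (hk : 0 ≤ k) (hj : 0 ≤ j)
    (hjk : j + k ≤ (seq.length : Int)) :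
    patterncountA seq (PySem.List.slice seq (some j) (some (j + k)))
      = ((kmersB seq k).count (PySem.List.slice seq (some j) (some (j + k))) : Int) := by
  set pat := PySem.List.slice seq (some j) (some (j + k)) with hpat
  have hlen : ((pat.length : Int)) = k := slice_len seq j k hj hk hjk
  unfold patterncountA kmersB
  simp only [hlen]
  rw [PySem.List.foldl_ite_add_one
    (p := fun i => PySem.List.slice seq (some i) (some (i + k)) = pat)]
  rw [List.count, List.countP_map, zero_add]
  congr 1
  apply List.countP_congr
  intro x _
  simp only [Function.comp_def, beq_iff_eq, decide_eq_true_eq]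

lemma counts_getD (kmers : List (List Char)) (m : List Char) :
    (countsB kmers).getD m 0 = (kmers.count m : Int) := by
  unfold countsB
  rw [PySem.Dict.getD_foldl_insert_add_one]
  simp

lemma diag_foldl {β γ : Type} (l : List γ) (fA : List β → γ → List β)
    (fB : List β × List β → γ → List β × List β)
    (h : ∀ c i, i ∈ l → fB (c, c) i = (fA c i, fA c i)) (c : List β) :
    l.foldl fB (c, c) = (l.foldl fA c, l.foldl fA c) := by
  induction l generalizing c with
  | nil => rfl
  | cons x xs ih =>
    simp only [List.foldl_cons]
    rw [h c x (by simp)]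
    exact ih (fun c i hi => h c i (List.mem_cons_of_mem _ hi)) _

lemma inner_eq (seq : List Char) (k t : Int) (hk : 0 ≤ k) (c : List (List Char)) :
    (kmersB seq k).foldl
      (fun st m =>
        if t ≤ (countsB (kmersB seq k)).getD m 0 ∧ m ∉ st.2 then
          (st.1 ++ [m], PySem.Set.add st.2 m)
        else st) (c, c)
    = ((PySem.List.pyRange 0 (((frequencyTableA seq k).length : Int))).foldl
        (fun clumps j =>
          if t ≤ PySem.List.pyGetD (frequencyTableA seq k) j 0 ∧
             PySem.List.slice seq (some j) (some (j + k)) ∉ clumps then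
            clumps ++ [PySem.List.slice seq (some j) (some (j + k))]
          else clumps) c,
       (PySem.List.pyRange 0 (((frequencyTableA seq k).length : Int))).foldl
        (fun clumps j =>
          if t ≤ PySem.List.pyGetD (frequencyTableA seq k) j 0 ∧
             PySem.List.slice seq (some j) (some (j + k)) ∉ clumps then
            clumps ++ [PySem.List.slice seq (some j) (some (j + k))]
          else clumps) c) := by
  have hft : frequencyTableA seq k
      = (PySem.List.pyRange 0 ((seq.length : Int) - k + 1)).map
          (fun i => patterncountA seq (PySem.List.slice seq (some i) (some (i + k)))) := by
    unfold frequencyTableA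
    rw [PySem.List.foldl_append_singleton_eq_map]
    simp
  have hlenft : ((frequencyTableA seq k).length : Int)
      = ((PySem.List.pyRange 0 ((seq.length : Int) - k + 1)).length : Int) := by
    rw [hft, List.length_map]
  have hrange : PySem.List.pyRange 0 (((frequencyTableA seq k).length : Int))
      = PySem.List.pyRange 0 ((seq.length : Int) - k + 1) := by
    rw [hlenft]; exact pyRange_len_idem _
  set cts := countsB (kmersB seq k) with hcts
  rw [hrange,
    show kmersB seq k
      = (PySem.List.pyRange 0 ((seq.length : Int) - k + 1)).map
          (fun j => PySem.List.slice seq (some j) (some (j + k))) from rfl,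
    List.foldl_map]
  apply diag_foldl
  intro c j hj
  obtain ⟨hj0, hjN⟩ := PySem.List.mem_pyRange_one.mp hj
  have hjk : j + k ≤ (seq.length : Int) := by omega
  have hpy : PySem.List.pyGetD (frequencyTableA seq k) j 0
      = patterncountA seq (PySem.List.slice seq (some j) (some (j + k))) := by
    have hN : (seq.length : Int) - k + 1 = (((seq.length : Int) - k + 1).toNat : Int) := by omega
    have hj' : j = (j.toNat : Int) := by omega
    rw [hft, hN, hj']
    exact PySem.List.pyGetD_map_pyRange _ _ _ 0 (by omega)
  rw [hpy, patterncount_eq_count seq k j hk hj0 hjk, hcts,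
    counts_getD (kmersB seq k) (PySem.List.slice seq (some j) (some (j + k)))]
  by_cases hcond :
      t ≤ ((kmersB seq k).count (PySem.List.slice seq (some j) (some (j + k))) : Int) ∧
        PySem.List.slice seq (some j) (some (j + k)) ∉ c
  · rw [if_pos hcond, if_pos hcond, PySem.Set.add_of_not_mem hcond.2]
  · rw [if_neg hcond, if_neg hcond]

lemma clumpfinder_eq_alt (text : String) (k l t : Int) (hk : 0 ≤ k) :
    clumpfinder text k l t = clumpfinder_alt text k l t := by
  unfold clumpfinder clumpfinder_alt
  simp only []
  rw [show (PySem.Set.empty : PySem.Set (List Char)) = ([] : List (List Char)) from rfl]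
  rw [diag_foldl _ _ _ (fun c i _ => inner_eq (PySem.List.slice text.toList (some i) (some (i + l))) k t hk c) []]

-- ===== VERDICT (by name: the statement is the Claim_ definition above) =====
theorem clumpfinder_spec : Claim_equal_clumpfinder := by
  intro text k l t _ hk
  unfold Spec_clumpfinder
  exact clumpfinder_eq_alt text k l t hk
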